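-- pv_equiv track=rewrite | github.com/achebatarev/AdventOfCode | 2023/13_day/main.py | equal_with_smudge
-- ===== SOURCE A (Python) =====
-- def equal_with_smudge(line1: str, line2: str, smudge: list[bool]) -> bool:
--     for e1, e2 in zip(line1, line2):
--         if e1 != e2 and smudge[0]:
--             smudge[0] = False
--             continue
--         elif e1 != e2:
--             return False
--     return True
-- ===== SOURCE B (Python) =====
-- def equal_with_smudge(line1: str, line2: str, smudge: list[bool]) -> bool:
--     # Count all mismatched positions in one pass; consult the smudge budget only if needed.
--     m = sum(c1 != c2 for c1, c2 in zip(line1, line2))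
--     if m == 0:
--         return True
--     if smudge[0]:
--         smudge[0] = False
--         return m == 1
--     return False
-- ===== Notes on version B (the rewrite author's own statement) =====
-- stated objective: simpler
-- what changed: Replaces the early-exit loop that threads mutable smudge state through each comparison with a count-then-decide decomposition: count all mismatches in one pass, then decide from the count and the smudge budget.
import Mathlib
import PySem

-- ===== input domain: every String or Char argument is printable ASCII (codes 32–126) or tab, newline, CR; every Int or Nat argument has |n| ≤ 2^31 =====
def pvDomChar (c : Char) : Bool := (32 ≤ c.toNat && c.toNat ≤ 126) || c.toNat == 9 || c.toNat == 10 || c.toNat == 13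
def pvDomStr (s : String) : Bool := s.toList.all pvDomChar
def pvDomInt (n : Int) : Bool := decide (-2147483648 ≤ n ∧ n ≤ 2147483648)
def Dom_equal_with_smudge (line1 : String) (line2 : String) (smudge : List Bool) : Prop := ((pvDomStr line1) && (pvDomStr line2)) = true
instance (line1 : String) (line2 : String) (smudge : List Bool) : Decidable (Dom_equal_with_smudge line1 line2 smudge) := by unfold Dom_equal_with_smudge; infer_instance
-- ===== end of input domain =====

-- B replaces A's early-exit loop (which threads the mutable smudge flag through each step) by
-- count-all-mismatches-then-decide; return value proved equal, and both Pythons perform the same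
-- in-place update of smudge[0] (verified by testing, not by these theorems).

-- ===== PORT A =====
-- A's for-loop over zip(line1, line2) carrying the current smudge list; smudge[0] read as headD
-- (inputs where Python's smudge[0] would raise IndexError are excluded by Pre_).
def ewsLoopA : List (Char × Char) → List Bool → Bool
  | [], _ => true
  | (e1, e2) :: rest, smudge =>
      if e1 ≠ e2 ∧ smudge.headD false then ewsLoopA rest (false :: smudge.tail)
      else if e1 ≠ e2 then false
      else ewsLoopA rest smudge

def equal_with_smudge (line1 : String) (line2 : String) (smudge : List Bool) : Bool :=
  ewsLoopA (line1.toList.zip line2.toList) smudge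

-- ===== PORT B =====
-- B: m = number of mismatched positions (one pass), then decide from m and the smudge budget.
def equal_with_smudge_alt (line1 : String) (line2 : String) (smudge : List Bool) : Bool :=
  let m := (line1.toList.zip line2.toList).countP (fun p => p.1 ≠ p.2)
  if m = 0 then true
  else if smudge.headD false then m == 1
  else false

-- ===== PRECONDITION & SPEC =====
-- Pre_ excludes exactly the inputs where BOTH Pythons raise IndexError: smudge = [] while some
-- zipped position mismatches (both read smudge[0] only then).
def Pre_equal_with_smudge (line1 : String) (line2 : String) (smudge : List Bool) : Prop :=
  smudge ≠ [] ∨ (line1.toList.zip line2.toList).all (fun p => p.1 == p.2) = true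
instance (line1 : String) (line2 : String) (smudge : List Bool) : Decidable (Pre_equal_with_smudge line1 line2 smudge) := by unfold Pre_equal_with_smudge; infer_instance
def pvWitness_equal_with_smudge : String × String × List Bool := ("ab.c", "axNc", [true])
def Spec_equal_with_smudge (line1 : String) (line2 : String) (smudge : List Bool) (out : Bool) : Prop := out = equal_with_smudge_alt line1 line2 smudge
instance (line1 : String) (line2 : String) (smudge : List Bool) (out : Bool) : Decidable (Spec_equal_with_smudge line1 line2 smudge out) := by unfold Spec_equal_with_smudge; infer_instance

-- ===== CLAIM (what is proved, stated in full; the proofs are below) =====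
def Claim_equal_equal_with_smudge : Prop := ∀ (line1 : String) (line2 : String) (smudge : List Bool), Dom_equal_with_smudge line1 line2 smudge → Pre_equal_with_smudge line1 line2 smudge → Spec_equal_with_smudge line1 line2 smudge (equal_with_smudge line1 line2 smudge)

-- ===== LEMMAS AND PROOFS =====

-- Loop invariant: A's loop equals B's count-then-decide formula, for every smudge state.
theorem ewsLoopA_eq (zs : List (Char × Char)) : ∀ (smudge : List Bool),
    ewsLoopA zs smudge =
      (if zs.countP (fun p => p.1 ≠ p.2) = 0 then true
       else if smudge.headD false then zs.countP (fun p => p.1 ≠ p.2) == 1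
       else false) := by
  induction zs with
  | nil => intro smudge; simp [ewsLoopA]
  | cons hd rest ih =>
      intro smudge
      obtain ⟨e1, e2⟩ := hd
      by_cases hne : e1 = e2
      · simp [ewsLoopA, hne, ih]
      · have hc : List.countP (fun p => decide (p.1 ≠ p.2)) ((e1, e2) :: rest)
            = List.countP (fun p => decide (p.1 ≠ p.2)) rest + 1 := by
          simp [hne]
        by_cases hs : smudge.headD false = true
        · have hstep : ewsLoopA ((e1, e2) :: rest) smudge
              = ewsLoopA rest (false :: smudge.tail) := by
            simp only [ewsLoopA]; rw [if_pos ⟨hne, hs⟩]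
          rw [hstep, ih, hc, hs, List.headD_cons]
          rw [if_pos rfl, if_neg (Nat.succ_ne_zero _)]
          cases hn : List.countP (fun p => decide (p.1 ≠ p.2)) rest <;> simp
        · have hstep : ewsLoopA ((e1, e2) :: rest) smudge = false := by
            simp only [ewsLoopA]
            rw [if_neg (fun h => hs h.2), if_pos hne]
          rw [hstep, hc, if_neg (Nat.succ_ne_zero _), if_neg hs]

-- ===== VERDICT (by name: the statement is the Claim_ definition above) =====
theorem equal_with_smudge_spec : Claim_equal_equal_with_smudge := by
  intro line1 line2 smudge _ _
  unfold Spec_equal_with_smudge equal_with_smudge equal_with_smudge_alt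
  simpa using ewsLoopA_eq (line1.toList.zip line2.toList) smudge
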